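-- pv_equiv track=rewrite | github.com/Lander37/Robot-Simulator | shortestpath.py | get_9_grids
-- ===== SOURCE A (Python) =====
-- def get_9_grids(node):
--     grids = []
--     top = [i for i in range(1, 14)]
--     left = [i for i in range(15, 285, 15)]
--     bottom = [i for i in range(286, 299)]
--     right = [i for i in range(29, 299, 15)]
--     if node in top:
--         transpose = [-1, 0, 1, 14, 15, 16]
--     elif node in left:
--         transpose = [-15,-14, 0 , 1, 15, 16]
--     elif node in bottom:
--         transpose = [-16, -15, -14, -1, 0, 1]
--     elif node in right:
--         transpose = [-16, -15, -1, 0, 14, 15]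
--     elif node == 0:
--         transpose = [0, 1, 15, 16]
--     elif node == 14:
--         transpose = [-1, 0, 14, 15]
--     elif node == 285:
--         transpose = [-15, -14, 0, 1]
--     elif node == 299:
--         transpose = [-16, -15, -1, 0]
--     else:
--         transpose = [-16, -15, -14, -1, 0, 1, 14, 15, 16]
--     for i in transpose:
--         temp_num = node + i
--         grids.append(temp_num)
--     return grids
-- ===== SOURCE B (Python) =====
-- def get_9_grids(node):
--     top = 1 <= node <= 13 or node == 0 or node == 14
--     bottom = 286 <= node <= 298 or node == 285 or node == 299
--     left = node in range(15, 285, 15) or node == 0 or node == 285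
--     right = node in range(29, 299, 15) or node == 14 or node == 299
--     grids = []
--     for off in (-16, -15, -14, -1, 0, 1, 14, 15, 16):
--         if top and off in (-16, -15, -14):
--             continue
--         if bottom and off in (14, 15, 16):
--             continue
--         if left and off in (-16, -1, 14):
--             continue
--         if right and off in (-14, 1, 16):
--             continue
--         grids.append(node + off)
--     return grids
-- ===== Notes on version B (the rewrite author's own statement) =====
-- stated objective: simpler
-- what changed: Replaces the long branch over hardcoded offset lists by four edge flags (corners folding into two flags each) and one filtered pass over the canonical offset list.
import Mathlib
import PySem

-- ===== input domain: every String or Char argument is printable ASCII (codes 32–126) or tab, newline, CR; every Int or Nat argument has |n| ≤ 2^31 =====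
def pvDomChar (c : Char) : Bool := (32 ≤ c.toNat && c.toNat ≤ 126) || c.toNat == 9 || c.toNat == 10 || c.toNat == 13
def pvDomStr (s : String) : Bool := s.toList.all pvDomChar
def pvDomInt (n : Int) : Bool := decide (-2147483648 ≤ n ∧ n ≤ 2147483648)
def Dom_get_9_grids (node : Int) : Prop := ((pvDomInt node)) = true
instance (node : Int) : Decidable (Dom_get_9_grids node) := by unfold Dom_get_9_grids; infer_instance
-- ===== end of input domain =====

-- B replaces A's long branch over hardcoded offset lists by four edge flags and one
-- filtered pass over the canonical offset list (objective: simpler decomposition).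

-- ===== PORT A =====
def get_9_grids (node : Int) : List Int :=
  let grids : List Int := []
  let top := PySem.List.pyRange 1 14 1
  let left := PySem.List.pyRange 15 285 15
  let bottom := PySem.List.pyRange 286 299 1
  let right := PySem.List.pyRange 29 299 15
  let transpose : List Int :=
    if top.contains node then [-1, 0, 1, 14, 15, 16]
    else if left.contains node then [-15, -14, 0, 1, 15, 16]
    else if bottom.contains node then [-16, -15, -14, -1, 0, 1]
    else if right.contains node then [-16, -15, -1, 0, 14, 15]
    else if node = 0 then [0, 1, 15, 16]
    else if node = 14 then [-1, 0, 14, 15]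
    else if node = 285 then [-15, -14, 0, 1]
    else if node = 299 then [-16, -15, -1, 0]
    else [-16, -15, -14, -1, 0, 1, 14, 15, 16]
  transpose.foldl (fun grids i => grids ++ [node + i]) grids

-- ===== PORT B =====
def get_9_grids_alt (node : Int) : List Int :=
  let top : Bool := (1 ≤ node && node ≤ 13) || node == 0 || node == 14
  let bottom : Bool := (286 ≤ node && node ≤ 298) || node == 285 || node == 299
  let left : Bool := (PySem.List.pyRange 15 285 15).contains node || node == 0 || node == 285
  let right : Bool := (PySem.List.pyRange 29 299 15).contains node || node == 14 || node == 299
  ([-16, -15, -14, -1, 0, 1, 14, 15, 16] : List Int).foldl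
    (fun grids off =>
      if top && (off == -16 || off == -15 || off == -14) then grids
      else if bottom && (off == 14 || off == 15 || off == 16) then grids
      else if left && (off == -16 || off == -1 || off == 14) then grids
      else if right && (off == -14 || off == 1 || off == 16) then grids
      else grids ++ [node + off]) []

-- ===== PRECONDITION & SPEC =====
def Spec_get_9_grids (node : Int) (out : List Int) : Prop := out = get_9_grids_alt node
instance (node : Int) (out : List Int) : Decidable (Spec_get_9_grids node out) := by unfold Spec_get_9_grids; infer_instance

-- ===== CLAIM (what is proved, stated in full; the proofs are below) =====
def Claim_equal_get_9_grids : Prop := ∀ (node : Int), Dom_get_9_grids node → Spec_get_9_grids node (get_9_grids node)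

-- ===== LEMMAS AND PROOFS =====

theorem pv_case_top (n : Int) (h1 : 1 ≤ n) (h2 : n ≤ 13) : get_9_grids n = get_9_grids_alt n := by
  have m1 : n ∈ PySem.List.pyRange 1 14 1 := by rw [PySem.List.mem_pyRange_one]; omega
  have m2 : ¬ n ∈ PySem.List.pyRange 15 285 15 := by
    rw [PySem.List.mem_pyRange_iff_of_pos (by norm_num)]; omega
  have m4 : ¬ n ∈ PySem.List.pyRange 29 299 15 := by
    rw [PySem.List.mem_pyRange_iff_of_pos (by norm_num)]; omega
  have e0 : ¬ n = 0 := by omega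
  have e14 : ¬ n = 14 := by omega
  have e285 : ¬ n = 285 := by omega
  have e299 : ¬ n = 299 := by omega
  have nb : ¬ (286 : Int) ≤ n := by omega
  simp [get_9_grids, get_9_grids_alt, m1, m2, m4, e0, e14, e285, e299, nb, h1, h2,
    List.contains_eq_mem]

theorem pv_case_left (n : Int) (h1 : 15 ≤ n) (h2 : n < 285) (h3 : (15:Int) ∣ n - 15) :
    get_9_grids n = get_9_grids_alt n := by
  have m1 : ¬ n ∈ PySem.List.pyRange 1 14 1 := by rw [PySem.List.mem_pyRange_one]; omega
  have m2 : n ∈ PySem.List.pyRange 15 285 15 := by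
    rw [PySem.List.mem_pyRange_iff_of_pos (by norm_num)]; exact ⟨h1, h2, h3⟩
  have m4 : ¬ n ∈ PySem.List.pyRange 29 299 15 := by
    rw [PySem.List.mem_pyRange_iff_of_pos (by norm_num)]; omega
  have e0 : ¬ n = 0 := by omega
  have e14 : ¬ n = 14 := by omega
  have e285 : ¬ n = 285 := by omega
  have e299 : ¬ n = 299 := by omega
  have nt : ¬ n ≤ 13 := by omega
  have nb : ¬ (286 : Int) ≤ n := by omega
  simp [get_9_grids, get_9_grids_alt, m1, m2, m4, e0, e14, e285, e299, nt, nb,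
    List.contains_eq_mem]

theorem pv_case_bottom (n : Int) (h1 : 286 ≤ n) (h2 : n ≤ 298) :
    get_9_grids n = get_9_grids_alt n := by
  have m1 : ¬ n ∈ PySem.List.pyRange 1 14 1 := by rw [PySem.List.mem_pyRange_one]; omega
  have m2 : ¬ n ∈ PySem.List.pyRange 15 285 15 := by
    rw [PySem.List.mem_pyRange_iff_of_pos (by norm_num)]; omega
  have m3 : n ∈ PySem.List.pyRange 286 299 1 := by rw [PySem.List.mem_pyRange_one]; omega
  have m4 : ¬ n ∈ PySem.List.pyRange 29 299 15 := by
    rw [PySem.List.mem_pyRange_iff_of_pos (by norm_num)]; omega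
  have e0 : ¬ n = 0 := by omega
  have e14 : ¬ n = 14 := by omega
  have e285 : ¬ n = 285 := by omega
  have e299 : ¬ n = 299 := by omega
  have nt : ¬ n ≤ 13 := by omega
  simp [get_9_grids, get_9_grids_alt, m1, m2, m3, m4, e0, e14, e285, e299, nt, h1, h2,
    List.contains_eq_mem]

theorem pv_case_right (n : Int) (h1 : 29 ≤ n) (h2 : n < 299) (h3 : (15:Int) ∣ n - 29) :
    get_9_grids n = get_9_grids_alt n := by
  have m1 : ¬ n ∈ PySem.List.pyRange 1 14 1 := by rw [PySem.List.mem_pyRange_one]; omega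
  have m2 : ¬ n ∈ PySem.List.pyRange 15 285 15 := by
    rw [PySem.List.mem_pyRange_iff_of_pos (by norm_num)]; omega
  have m3 : ¬ n ∈ PySem.List.pyRange 286 299 1 := by rw [PySem.List.mem_pyRange_one]; omega
  have m4 : n ∈ PySem.List.pyRange 29 299 15 := by
    rw [PySem.List.mem_pyRange_iff_of_pos (by norm_num)]; exact ⟨h1, h2, h3⟩
  have e0 : ¬ n = 0 := by omega
  have e14 : ¬ n = 14 := by omega
  have e285 : ¬ n = 285 := by omega
  have e299 : ¬ n = 299 := by omega
  have nt : ¬ n ≤ 13 := by omega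
  have nb : ¬ (286 : Int) ≤ n := by omega
  simp [get_9_grids, get_9_grids_alt, m1, m2, m3, m4, e0, e14, e285, e299, nt, nb,
    List.contains_eq_mem]

theorem pv_case_corner (n : Int) (h : n = 0 ∨ n = 14 ∨ n = 285 ∨ n = 299) :
    get_9_grids n = get_9_grids_alt n := by
  have m1 : ¬ n ∈ PySem.List.pyRange 1 14 1 := by rw [PySem.List.mem_pyRange_one]; omega
  have m2 : ¬ n ∈ PySem.List.pyRange 15 285 15 := by
    rw [PySem.List.mem_pyRange_iff_of_pos (by norm_num)]; omega
  have m3 : ¬ n ∈ PySem.List.pyRange 286 299 1 := by rw [PySem.List.mem_pyRange_one]; omega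
  have m4 : ¬ n ∈ PySem.List.pyRange 29 299 15 := by
    rw [PySem.List.mem_pyRange_iff_of_pos (by norm_num)]; omega
  rcases h with h | h | h | h <;> subst h <;>
    simp [get_9_grids, get_9_grids_alt, m1, m2, m3, m4, List.contains_eq_mem]

theorem pv_case_interior (n : Int) (hT : ¬(1 ≤ n ∧ n ≤ 13)) (hB : ¬(286 ≤ n ∧ n ≤ 298))
    (hL : ¬ n ∈ PySem.List.pyRange 15 285 15) (hR : ¬ n ∈ PySem.List.pyRange 29 299 15)
    (e0 : ¬ n = 0) (e14 : ¬ n = 14) (e285 : ¬ n = 285) (e299 : ¬ n = 299) :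
    get_9_grids n = get_9_grids_alt n := by
  have m1 : ¬ n ∈ PySem.List.pyRange 1 14 1 := by rw [PySem.List.mem_pyRange_one]; omega
  have m3 : ¬ n ∈ PySem.List.pyRange 286 299 1 := by rw [PySem.List.mem_pyRange_one]; omega
  simp [get_9_grids, get_9_grids_alt, m1, hL, m3, hR, e0, e14, e285, e299,
    List.contains_eq_mem, ← Bool.decide_and, hT, hB]

-- ===== VERDICT (by name: the statement is the Claim_ definition above) =====
theorem get_9_grids_spec : Claim_equal_get_9_grids := by
  intro n _
  unfold Spec_get_9_grids
  by_cases hT : 1 ≤ n ∧ n ≤ 13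
  · exact pv_case_top n hT.1 hT.2
  by_cases hL : 15 ≤ n ∧ n < 285 ∧ (15:Int) ∣ n - 15
  · exact pv_case_left n hL.1 hL.2.1 hL.2.2
  by_cases hB : 286 ≤ n ∧ n ≤ 298
  · exact pv_case_bottom n hB.1 hB.2
  by_cases hR : 29 ≤ n ∧ n < 299 ∧ (15:Int) ∣ n - 29
  · exact pv_case_right n hR.1 hR.2.1 hR.2.2
  by_cases hc : n = 0 ∨ n = 14 ∨ n = 285 ∨ n = 299
  · exact pv_case_corner n hc
  · refine pv_case_interior n hT hB ?_ ?_ ?_ ?_ ?_ ?_ <;>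
      first
        | (rw [PySem.List.mem_pyRange_iff_of_pos (by norm_num)]; omega)
        | omega
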